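-- pv_equiv track=rewrite | github.com/manuelpeba/world-cup-2026-forecast | src/simulation/parallel.py | _split_simulation_counts
-- ===== SOURCE A (Python) =====
-- def _split_simulation_counts(
--     total_simulations: int,
--     num_workers: int,
-- ) -> list[int]:
--     """
--     Split total number of simulations into near-equal worker chunks.
--     """
--     if total_simulations <= 0:
--         raise ValueError("total_simulations must be > 0")
--
--     if num_workers <= 0:
--         raise ValueError("num_workers must be > 0")
--
--     base = total_simulations // num_workers
--     remainder = total_simulations % num_workers
--
--     counts = [base] * num_workers
--     for i in range(remainder):
--         counts[i] += 1
--
--     return [count for count in counts if count > 0]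
-- ===== SOURCE B (Python) =====
-- def _split_simulation_counts(
--     total_simulations: int,
--     num_workers: int,
-- ) -> list[int]:
--     """
--     Split total number of simulations into near-equal worker chunks.
--     """
--     if total_simulations <= 0:
--         raise ValueError("total_simulations must be > 0")
--
--     if num_workers <= 0:
--         raise ValueError("num_workers must be > 0")
--
--     # Greedy: give the next worker the ceiling of what remains divided by the
--     # workers still unserved, then recurse on the rest; stop when nothing remains.
--     counts = []
--     remaining = total_simulations
--     workers = num_workers
--     while remaining > 0:
--         chunk = -(-remaining // workers)  # ceiling division
--         counts.append(chunk)
--         remaining -= chunk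
--         workers -= 1
--     return counts
-- ===== Notes on version B (the rewrite author's own statement) =====
-- stated objective: alternative
-- what changed: Replaces the divmod base/remainder list built by replicate-and-increment and then filtered by a greedy loop that repeatedly gives the next worker the ceiling of remaining/workers-left and stops when nothing remains (no filter pass, no precomputed list).
import Mathlib
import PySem

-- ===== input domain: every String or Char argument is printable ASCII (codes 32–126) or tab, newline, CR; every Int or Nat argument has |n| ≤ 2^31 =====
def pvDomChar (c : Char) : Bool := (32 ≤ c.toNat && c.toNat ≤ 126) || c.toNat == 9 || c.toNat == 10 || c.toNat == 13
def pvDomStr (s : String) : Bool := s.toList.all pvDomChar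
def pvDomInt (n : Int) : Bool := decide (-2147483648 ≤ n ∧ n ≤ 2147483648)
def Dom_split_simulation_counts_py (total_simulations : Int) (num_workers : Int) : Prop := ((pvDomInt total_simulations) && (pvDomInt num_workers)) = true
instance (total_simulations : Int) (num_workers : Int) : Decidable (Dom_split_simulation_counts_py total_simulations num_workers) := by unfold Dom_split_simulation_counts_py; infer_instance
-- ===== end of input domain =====

-- B replaces A's replicate/increment/filter construction by a greedy loop that
-- gives the next worker the ceiling of remaining/workers-left until nothing
-- remains (alternative decomposition, similar cost).

-- ===== PORT A =====
def split_simulation_counts_py (total_simulations : Int) (num_workers : Int) : List Int :=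
  if total_simulations ≤ 0 then []        -- Python raises ValueError; excluded by Pre_
  else if num_workers ≤ 0 then []         -- Python raises ValueError; excluded by Pre_
  else
    let base := PySem.Int.floordiv total_simulations num_workers
    let remainder := PySem.Int.mod total_simulations num_workers
    let counts := List.replicate num_workers.toNat base
    let counts := (PySem.List.pyRange 0 remainder).foldl
      (fun cs i => cs.set i.toNat (cs.getD i.toNat 0 + 1)) counts
    counts.filter (fun c => decide (0 < c))

-- ===== PORT B =====
-- B's while loop: `workers` decreases by exactly 1 each iteration, so it is
-- transcribed as structural recursion with the current worker count as fuel.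
def pvGreedyGo : Nat → Int → List Int
  | 0, _ => []                            -- unreachable while remaining > 0 (guards ensure workers ≥ 1)
  | w + 1, remaining =>
    if remaining ≤ 0 then []              -- loop condition `while remaining > 0`
    else
      let chunk := -(PySem.Int.floordiv (-remaining) ((w : Int) + 1))  -- -(-remaining // workers)
      chunk :: pvGreedyGo w (remaining - chunk)

def split_simulation_counts_py_alt (total_simulations : Int) (num_workers : Int) : List Int :=
  if total_simulations ≤ 0 then []        -- Python raises ValueError; excluded by Pre_
  else if num_workers ≤ 0 then []         -- Python raises ValueError; excluded by Pre_
  else pvGreedyGo num_workers.toNat total_simulations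

-- ===== PRECONDITION & SPEC =====
-- Pre_ excludes exactly the inputs on which the Python A raises ValueError
-- (total_simulations ≤ 0 or num_workers ≤ 0); B raises the same errors there.
def Pre_split_simulation_counts_py (total_simulations : Int) (num_workers : Int) : Prop :=
  0 < total_simulations ∧ 0 < num_workers
instance (total_simulations : Int) (num_workers : Int) : Decidable (Pre_split_simulation_counts_py total_simulations num_workers) := by unfold Pre_split_simulation_counts_py; infer_instance

def pvWitness_split_simulation_counts_py : Int × Int := (10, 3)

def Spec_split_simulation_counts_py (total_simulations : Int) (num_workers : Int) (out : List Int) : Prop := out = split_simulation_counts_py_alt total_simulations num_workers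
instance (total_simulations : Int) (num_workers : Int) (out : List Int) : Decidable (Spec_split_simulation_counts_py total_simulations num_workers out) := by unfold Spec_split_simulation_counts_py; infer_instance

-- ===== CLAIM (what is proved, stated in full; the proofs are below) =====
def Claim_equal_split_simulation_counts_py : Prop := ∀ (total_simulations : Int) (num_workers : Int), Dom_split_simulation_counts_py total_simulations num_workers → Pre_split_simulation_counts_py total_simulations num_workers → Spec_split_simulation_counts_py total_simulations num_workers (split_simulation_counts_py total_simulations num_workers)

-- ===== LEMMAS AND PROOFS =====

-- A's increment loop over range(remainder), started from [base] * W, yields the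
-- list whose first `n` entries are base+1 and the rest base.
theorem pv_fold_incr (base : Int) (W n : Nat) (h : n ≤ W) :
    (PySem.List.pyRange 0 (n : Int)).foldl
      (fun cs i => cs.set i.toNat (cs.getD i.toNat 0 + 1)) (List.replicate W base)
    = (List.range W).map (fun j => if j < n then base + 1 else base) := by
  induction n with
  | zero =>
    simp [PySem.List.pyRange]
  | succ n ih =>
    have hcast : ((n + 1 : Nat) : Int) = (n : Int) + 1 := by push_cast; ring
    rw [hcast, PySem.List.pyRange_one_succ_right (by positivity), List.foldl_append,
        ih (by omega)]
    simp only [List.foldl_cons, List.foldl_nil, Int.toNat_natCast]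
    have hn : n < W := by omega
    have hget : ((List.range W).map (fun j => if j < n then base + 1 else base)).getD n 0
        = base := by
      rw [List.getD_eq_getElem _ _ (by simpa using hn)]
      simp
    rw [hget]
    apply List.ext_getElem
    · simp
    · intro j hj hj'
      simp only [List.length_set, List.length_map, List.length_range] at hj
      rw [List.getElem_set]
      by_cases hjn : n = j
      · subst hjn; simp
      · simp only [if_neg hjn, List.getElem_map, List.getElem_range]
        split_ifs <;> first | rfl | omega

-- B's greedy loop produces exactly A's base/base+1 pattern with the zero
-- chunks filtered out.
theorem pv_greedy (w : Nat) : ∀ (t : Int), 0 ≤ t →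
    pvGreedyGo w t
    = ((List.range w).map (fun j =>
        if j < (PySem.Int.mod t (w : Int)).toNat then PySem.Int.floordiv t (w : Int) + 1
        else PySem.Int.floordiv t (w : Int))).filter (fun c => decide (0 < c)) := by
  induction w with
  | zero => intro t _; simp [pvGreedyGo]
  | succ w ih =>
    intro t ht0
    by_cases htz : t ≤ 0
    · -- t = 0: loop does not run; pattern is all zeros, filtered away
      have ht' : t = 0 := le_antisymm htz ht0
      subst ht'
      simp [pvGreedyGo, PySem.Int.floordiv, PySem.Int.mod]
    · have htpos : 0 < t := by omega
      rw [show ((w + 1 : Nat) : Int) = (w : Int) + 1 from by push_cast; ring]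
      have hnpos : (0 : Int) < (w : Int) + 1 := by positivity
      have hsum := PySem.Int.floordiv_mul_add_mod t ((w : Int) + 1)
      have hr0 := PySem.Int.mod_nonneg t hnpos
      have hrlt := PySem.Int.mod_lt t hnpos
      -- name base and r opaquely
      obtain ⟨base, hbase⟩ : ∃ b, PySem.Int.floordiv t ((w : Int) + 1) = b := ⟨_, rfl⟩
      obtain ⟨r, hrdef⟩ : ∃ x, PySem.Int.mod t ((w : Int) + 1) = x := ⟨_, rfl⟩
      rw [hbase] at hsum ⊢
      rw [hrdef] at hsum hr0 hrlt ⊢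
      have hbase0 : 0 ≤ base := by
        by_contra h
        have hm := mul_le_mul_of_nonneg_right (by omega : base ≤ -1)
          (by positivity : (0 : Int) ≤ (w : Int) + 1)
        nlinarith
      -- name the ceiling chunk opaquely and compute its value
      obtain ⟨c, hcg⟩ : ∃ c, (if r = 0 then base else base + 1) = c := ⟨_, rfl⟩
      have hc : -(PySem.Int.floordiv (-t) ((w : Int) + 1)) = c := by
        rw [← hcg]
        by_cases hr' : r = 0
        · rw [if_pos hr', PySem.Int.neg_floordiv_neg_eq_iff_of_pos hnpos]
          constructor <;> nlinarith [hsum]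
        · rw [if_neg hr', PySem.Int.neg_floordiv_neg_eq_iff_of_pos hnpos]
          have h1 : 1 ≤ r := by omega
          constructor <;> nlinarith [hsum]
      have hcpos : 0 < c := by
        rw [← hcg]
        split_ifs with hr'
        · by_contra h
          have hb : base = 0 := by omega
          rw [hr', hb] at hsum
          simp at hsum
          omega
        · omega
      have hcle : c ≤ t := by
        rw [← hcg]
        split_ifs with hr'
        · nlinarith [hsum]
        · have h1 : 1 ≤ r := by omega
          nlinarith [hsum]
      -- one iteration of B's loop
      have hstep : pvGreedyGo (w + 1) t = c :: pvGreedyGo w (t - c) := by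
        rw [pvGreedyGo, if_neg htz]
        dsimp only
        rw [hc]
      rw [hstep, ih _ (by omega)]
      -- the pattern for (t - c, w) is the tail of the pattern for (t, w + 1)
      have htail : ∀ j, j < w →
          (if j < (PySem.Int.mod (t - c) (w : Int)).toNat
            then PySem.Int.floordiv (t - c) (w : Int) + 1
            else PySem.Int.floordiv (t - c) (w : Int))
          = (if j + 1 < r.toNat then base + 1 else base) := by
        intro j hj
        have hw0 : 0 < w := Nat.lt_of_le_of_lt (Nat.zero_le j) hj
        have hwpos : (0 : Int) < (w : Int) := by exact_mod_cast hw0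
        have hfd : PySem.Int.floordiv (t - c) (w : Int) = base := by
          rw [PySem.Int.floordiv_eq_iff_of_pos hwpos]
          by_cases hr' : r = 0
          · have hct : c = base := by rw [← hcg, if_pos hr']
            rw [hct]
            constructor <;> nlinarith [hsum]
          · have hct : c = base + 1 := by rw [← hcg, if_neg hr']
            have h1 : 1 ≤ r := by omega
            rw [hct]
            constructor <;> nlinarith [hsum]
        have hid := PySem.Int.floordiv_mul_add_mod (t - c) (w : Int)
        rw [hfd] at hid
        have hmod : PySem.Int.mod (t - c) (w : Int) = if r = 0 then 0 else r - 1 := by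
          by_cases hr' : r = 0
          · have hct : c = base := by rw [← hcg, if_pos hr']
            rw [hct] at hid ⊢
            rw [if_pos hr']
            linear_combination hid - hsum + hr'
          · have hct : c = base + 1 := by rw [← hcg, if_neg hr']
            rw [hct] at hid ⊢
            rw [if_neg hr']
            linear_combination hid - hsum
        rw [hfd, hmod]
        split_ifs <;> first | rfl | (exfalso; omega)
      -- assemble: peel the head of the (w+1)-pattern
      rw [List.range_succ_eq_map]
      simp only [List.map_cons, List.map_map, List.filter_cons]
      have hhead : (if (0 : Nat) < r.toNat then base + 1 else base) = c := by
        rw [← hcg]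
        split_ifs <;> first | rfl | omega
      rw [hhead, if_pos (by simpa using hcpos)]
      congr 1
      congr 1
      apply List.map_congr_left
      intro j hj
      simpa using htail j (List.mem_range.mp hj)

-- ===== VERDICT (by name: the statement is the Claim_ definition above) =====
theorem split_simulation_counts_py_spec : Claim_equal_split_simulation_counts_py := by
  intro t n _ hpre
  obtain ⟨ht, hn⟩ := hpre
  unfold Spec_split_simulation_counts_py split_simulation_counts_py split_simulation_counts_py_alt
  rw [if_neg (by omega), if_neg (by omega), if_neg (by omega), if_neg (by omega)]
  dsimp only
  have hr := PySem.Int.mod_nonneg t hn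
  have hrlt := PySem.Int.mod_lt t hn
  have hrw : PySem.Int.mod t n = ((PySem.Int.mod t n).toNat : Int) := by omega
  rw [hrw, pv_fold_incr _ _ _ (by omega), pv_greedy n.toNat t ht.le]
  rw [Int.toNat_of_nonneg hn.le]
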